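-- pv_equiv track=rewrite | github.com/ShreeyaPattani/Apriori | Midterm.py | check_sub_lists
-- ===== SOURCE A (Python) =====
-- import itertools
--
-- def check_sub_lists(list1, list2):
--     list1 = list(list1)
--     list2 = sorted(list2)
--     sub_lists = []
--     for L in range(0, len(list2)+1):
--         for subset in itertools.combinations(list2, L):
--             sub_lists.append(list(subset))
--     return True if list1 in sub_lists else False
-- ===== SOURCE B (Python) =====
-- def check_sub_lists(list1, list2):
--     sorted2 = sorted(list2)
--     j = 0
--     for x in list1:
--         while j < len(sorted2) and sorted2[j] != x:
--             j += 1
--         if j == len(sorted2):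
--             return False
--         j += 1
--     return True
-- ===== Notes on version B (the rewrite author's own statement) =====
-- stated objective: faster
-- what changed: Replaced the enumeration of all 2^n combinations of sorted(list2) plus a list membership test with a single greedy two-pointer subsequence scan over sorted(list2).
import Mathlib
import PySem

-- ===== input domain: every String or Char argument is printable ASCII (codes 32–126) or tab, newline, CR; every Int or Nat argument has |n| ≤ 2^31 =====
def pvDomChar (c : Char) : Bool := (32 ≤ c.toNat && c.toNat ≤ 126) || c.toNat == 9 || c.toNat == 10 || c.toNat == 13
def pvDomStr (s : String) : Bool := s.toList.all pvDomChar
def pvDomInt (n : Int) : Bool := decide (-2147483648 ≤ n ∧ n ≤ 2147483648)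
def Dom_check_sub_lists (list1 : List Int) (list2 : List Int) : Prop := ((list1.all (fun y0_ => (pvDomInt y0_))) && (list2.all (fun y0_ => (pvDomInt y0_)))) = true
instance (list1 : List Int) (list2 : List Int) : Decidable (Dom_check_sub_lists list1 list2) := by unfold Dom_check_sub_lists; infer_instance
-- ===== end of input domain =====

-- B replaces A's enumeration of all combinations of sorted(list2) with one greedy
-- two-pointer subsequence scan (objective: faster, exponential → n log n).

-- ===== PORT A =====
-- itertools.combinations(l, L) as lists, in itertools' order
def pvCombos : Nat → List Int → List (List Int)
  | 0, _ => [[]]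
  | _ + 1, [] => []
  | L + 1, x :: xs => (pvCombos L xs).map (fun s => x :: s) ++ pvCombos (L + 1) xs

def check_sub_lists (list1 : List Int) (list2 : List Int) : Bool :=
  let list1 := list1
  let list2 := PySem.List.sorted list2 (fun x => x) false
  let sub_lists := (List.range (list2.length + 1)).foldl
    (fun acc L => acc ++ pvCombos L list2) []
  if list1 ∈ sub_lists then true else false

-- ===== PORT B =====
-- the two-pointer loop of Source B: first list = remaining elements of list1 (loop var x
-- and its tail), second list = the suffix of sorted2 from index j onward
def pvGreedy : List Int → List Int → Bool
  | [], _ => true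
  | _ :: _, [] => false
  | x :: xs, y :: ys => if y = x then pvGreedy xs ys else pvGreedy (x :: xs) ys
termination_by l1 l2 => (l2.length, l1.length)

def check_sub_lists_alt (list1 : List Int) (list2 : List Int) : Bool :=
  pvGreedy list1 (PySem.List.sorted list2 (fun x => x) false)

-- ===== PRECONDITION & SPEC =====
def Spec_check_sub_lists (list1 : List Int) (list2 : List Int) (out : Bool) : Prop := out = check_sub_lists_alt list1 list2
instance (list1 : List Int) (list2 : List Int) (out : Bool) : Decidable (Spec_check_sub_lists list1 list2 out) := by unfold Spec_check_sub_lists; infer_instance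

-- ===== CLAIM (what is proved, stated in full; the proofs are below) =====
def Claim_equal_check_sub_lists : Prop := ∀ (list1 : List Int) (list2 : List Int), Dom_check_sub_lists list1 list2 → Spec_check_sub_lists list1 list2 (check_sub_lists list1 list2)

-- ===== LEMMAS AND PROOFS =====

theorem pvCombos_mem (l : List Int) : ∀ (L : Nat) (x : List Int),
    x ∈ pvCombos L l ↔ x.Sublist l ∧ x.length = L := by
  induction l with
  | nil =>
    intro L x
    cases L with
    | zero => simp [pvCombos, List.sublist_nil]
    | succ L =>
      simp only [pvCombos, List.not_mem_nil, false_iff]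
      rintro ⟨hs, hl⟩
      simp [List.sublist_nil] at hs
      simp [hs] at hl
  | cons a as ih =>
    intro L x
    cases L with
    | zero =>
      simp only [pvCombos, List.mem_singleton]
      constructor
      · rintro rfl; exact ⟨List.nil_sublist _, rfl⟩
      · rintro ⟨_, hl⟩; exact List.length_eq_zero_iff.mp hl
    | succ L =>
      simp only [pvCombos, List.mem_append, List.mem_map]
      constructor
      · rintro (⟨s, hs, rfl⟩ | h)
        · obtain ⟨h1, h2⟩ := (ih L s).mp hs
          exact ⟨List.Sublist.cons₂ a h1, by simp [h2]⟩
        · obtain ⟨h1, h2⟩ := (ih (L + 1) x).mp h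
          exact ⟨h1.cons a, h2⟩
      · rintro ⟨hs, hl⟩
        cases hs with
        | cons _ h => exact Or.inr ((ih (L + 1) x).mpr ⟨h, hl⟩)
        | cons₂ _ h =>
          exact Or.inl ⟨_, (ih L _).mpr ⟨h, by simpa using hl⟩, rfl⟩

theorem pvGreedy_iff : ∀ (l2 l1 : List Int), pvGreedy l1 l2 = true ↔ l1.Sublist l2 := by
  intro l2
  induction l2 with
  | nil =>
    intro l1
    cases l1 with
    | nil => simp [pvGreedy]
    | cons x xs => simp [pvGreedy]
  | cons y ys ih =>
    intro l1
    cases l1 with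
    | nil => simp [pvGreedy, List.nil_sublist]
    | cons x xs =>
      by_cases h : y = x
      · subst h
        rw [pvGreedy, if_pos rfl, ih xs]
        constructor
        · exact fun hs => hs.cons₂ y
        · intro hs
          cases hs with
          | cons _ h' => exact (List.sublist_cons_self y xs).trans h'
          | cons₂ _ h' => exact h'
      · rw [pvGreedy, if_neg h, ih]
        constructor
        · exact fun hs => hs.cons y
        · intro hs
          cases hs with
          | cons _ h' => exact h'
          | cons₂ _ _ => exact absurd rfl h

theorem foldl_combos_mem (l : List Int) (x : List Int) :
    (x ∈ (List.range (l.length + 1)).foldl (fun acc L => acc ++ pvCombos L l) []) ↔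
      x.Sublist l := by
  rw [PySem.List.foldl_append_eq_flatMap]
  simp only [List.nil_append, List.mem_flatMap, List.mem_range, pvCombos_mem]
  constructor
  · rintro ⟨L, _, h, _⟩; exact h
  · intro h
    exact ⟨x.length, Nat.lt_succ_of_le h.length_le, h, rfl⟩

-- ===== VERDICT (by name: the statement is the Claim_ definition above) =====
theorem check_sub_lists_spec : Claim_equal_check_sub_lists := by
  intro list1 list2 _
  unfold Spec_check_sub_lists check_sub_lists check_sub_lists_alt
  simp only []
  by_cases h : list1.Sublist (PySem.List.sorted list2 (fun x => x) false)
  · rw [(pvGreedy_iff _ _).mpr h, if_pos ((foldl_combos_mem _ _).mpr h)]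
  · have hg : pvGreedy list1 (PySem.List.sorted list2 (fun x => x) false) = false := by
      cases hh : pvGreedy list1 (PySem.List.sorted list2 (fun x => x) false) with
      | false => rfl
      | true => exact absurd ((pvGreedy_iff _ _).mp hh) h
    rw [hg, if_neg (fun hm => h ((foldl_combos_mem _ _).mp hm))]
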